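-- pv_equiv track=rewrite | github.com/habibw65/ICONEEx_analysis | src/Clarabog/process_clarabog_data.py | _findfirststart
-- ===== SOURCE A (Python) =====
-- def _findfirststart(starts, names):
--     """
--     Helper function to find the first occurrence in 'names' that starts with any string in 'starts'.
--     Used by hesseflux examples.
--     """
--     found_names = []
--     for s in starts:
--         for name in names:
--             if name.startswith(s):
--                 found_names.append(name)
--                 break # Found the first one for this 's', move to next 's'
--     return found_names
-- ===== SOURCE B (Python) =====
-- def _findfirststart(starts, names):
--     """Single pass over names: record the first matching name for each prefix
--     in a dict, then emit results in prefix order."""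
--     first = {}
--     for name in names:
--         for s in starts:
--             if s not in first and name.startswith(s):
--                 first[s] = name
--     return [first[s] for s in starts if s in first]
-- ===== Notes on version B (the rewrite author's own statement) =====
-- stated objective: alternative
-- what changed: Loop order inverted: one pass over names builds a dict mapping each prefix to its first matching name, then the result is read off the dict in prefix order, instead of rescanning names from the start for every prefix.
import Mathlib
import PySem

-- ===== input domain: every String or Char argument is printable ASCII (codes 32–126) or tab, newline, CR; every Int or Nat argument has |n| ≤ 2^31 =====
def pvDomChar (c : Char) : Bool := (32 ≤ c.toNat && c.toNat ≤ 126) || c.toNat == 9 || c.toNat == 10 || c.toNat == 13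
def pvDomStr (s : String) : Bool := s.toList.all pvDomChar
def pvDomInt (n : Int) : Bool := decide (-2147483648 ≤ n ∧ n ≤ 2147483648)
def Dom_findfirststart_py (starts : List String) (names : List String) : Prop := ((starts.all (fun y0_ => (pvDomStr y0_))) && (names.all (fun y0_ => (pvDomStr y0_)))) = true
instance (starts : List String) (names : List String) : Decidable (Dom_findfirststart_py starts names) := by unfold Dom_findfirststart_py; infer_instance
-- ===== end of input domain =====

-- B inverts the loop order (one pass over names filling a dict keyed by prefix); same results, alternative structure.

-- ===== PORT A =====
-- inner 'for name in names: … break' loop of A: first name starting with s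
def pvInnerA (s : String) : List String → Option String
  | [] => none
  | n :: rest => if PySem.Str.startswith n s then some n else pvInnerA s rest

def findfirststart_py (starts : List String) (names : List String) : List String :=
  starts.foldl (fun acc s =>
    match pvInnerA s names with
    | some n => acc ++ [n]
    | none => acc) []

-- ===== PORT B =====
-- inner 'for s in starts' loop of B: record name for every not-yet-seen matching prefix
def pvStepB (starts : List String) (d : PySem.Dict String String) (name : String) : PySem.Dict String String :=
  starts.foldl (fun d s =>
    if d.contains s = false && PySem.Str.startswith name s then d.insert s name else d) d

def findfirststart_py_alt (starts : List String) (names : List String) : List String :=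
  let first := names.foldl (pvStepB starts) PySem.Dict.empty
  starts.filterMap (fun s => first.get? s)

-- ===== PRECONDITION & SPEC =====
def Spec_findfirststart_py (starts : List String) (names : List String) (out : List String) : Prop := out = findfirststart_py_alt starts names
instance (starts : List String) (names : List String) (out : List String) : Decidable (Spec_findfirststart_py starts names out) := by unfold Spec_findfirststart_py; infer_instance

-- ===== CLAIM (what is proved, stated in full; the proofs are below) =====
def Claim_equal_findfirststart_py : Prop := ∀ (starts : List String) (names : List String), Dom_findfirststart_py starts names → Spec_findfirststart_py starts names (findfirststart_py starts names)

-- ===== LEMMAS AND PROOFS =====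

-- one name's inner loop, seen through get?
theorem pvStepB_get? (starts : List String) (d : PySem.Dict String String) (name s : String) :
    (pvStepB starts d name).get? s =
      if s ∈ starts ∧ d.get? s = none ∧ PySem.Str.startswith name s = true then some name else d.get? s := by
  unfold pvStepB
  induction starts generalizing d with
  | nil => simp
  | cons t rest ih =>
    simp only [List.foldl_cons]
    by_cases hcond : d.get? t = none ∧ PySem.Str.startswith name t = true
    · rw [if_pos (by
        simp only [Bool.and_eq_true, decide_eq_true_eq]
        exact ⟨(PySem.Dict.get?_eq_none_iff_contains d t).mp hcond.1, hcond.2⟩)]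
      rw [ih]
      by_cases hts : s = t
      · subst hts
        have hins : (d.insert s name).get? s = some name := PySem.Dict.get?_insert_self d s name
        rw [if_neg (by rw [hins]; rintro ⟨-, h, -⟩; exact Option.some_ne_none _ h)]
        rw [hins, if_pos ⟨List.mem_cons_self, hcond.1, hcond.2⟩]
      · have hins : (d.insert t name).get? s = d.get? s := PySem.Dict.get?_insert_of_ne d name hts
        rw [hins]
        simp only [List.mem_cons, hts, false_or]
    · have hnc : ¬ (decide (d.contains t = false) && PySem.Str.startswith name t) = true := by
        simp only [Bool.and_eq_true, decide_eq_true_eq]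
        rintro ⟨h1, h2⟩
        exact hcond ⟨(PySem.Dict.get?_eq_none_iff_contains d t).mpr h1, h2⟩
      rw [if_neg hnc, ih]
      by_cases hts : s = t
      · subst hts
        rw [if_neg (by rintro ⟨-, h1, h2⟩; exact hcond ⟨h1, h2⟩),
            if_neg (by rintro ⟨-, h1, h2⟩; exact hcond ⟨h1, h2⟩)]
      · simp only [List.mem_cons, hts, false_or]

-- whole names loop, seen through get?, for prefixes in starts
theorem pvFoldB_get? (starts : List String) (names : List String) (d : PySem.Dict String String)
    (s : String) (hs : s ∈ starts) :
    (names.foldl (pvStepB starts) d).get? s = (d.get? s).or (pvInnerA s names) := by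
  induction names generalizing d with
  | nil => simp [pvInnerA]
  | cons name rest ih =>
    simp only [List.foldl_cons]
    rw [ih, pvStepB_get?]
    by_cases hsw : PySem.Chars.startswith name.toList s.toList = true
    · cases hg : d.get? s with
      | none => simp [pvInnerA, PySem.Str.startswith_eq, hs, hsw]
      | some v => simp [pvInnerA, PySem.Str.startswith_eq, hsw]
    · simp [pvInnerA, PySem.Str.startswith_eq, hsw]

theorem pvFoldA_append (starts : List String) (names : List String) (acc : List String) :
    starts.foldl (fun acc s =>
      match pvInnerA s names with
      | some n => acc ++ [n]
      | none => acc) acc = acc ++ starts.filterMap (fun s => pvInnerA s names) := by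
  induction starts generalizing acc with
  | nil => simp
  | cons t rest ih =>
    simp only [List.foldl_cons, List.filterMap_cons]
    cases h : pvInnerA t names with
    | none => simp [ih]
    | some n => simp [ih]

-- ===== VERDICT (by name: the statement is the Claim_ definition above) =====
theorem findfirststart_py_spec : Claim_equal_findfirststart_py := by
  intro starts names _
  unfold Spec_findfirststart_py findfirststart_py findfirststart_py_alt
  rw [pvFoldA_append]
  simp only [List.nil_append]
  apply List.filterMap_congr
  intro s hs
  rw [pvFoldB_get? starts names PySem.Dict.empty s hs]
  simp
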